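-- pv_equiv track=rewrite | github.com/HrtBridge/vibeathon-repo | state_engine/engine.py | _pick_best_id_field_fallback
-- ===== SOURCE A (Python) =====
-- from typing import Dict, List, Optional, Set, Tuple
--
-- def _candidate_id_fields(rows: List[dict]) -> List[str]:
--     if not rows:
--         return []
--     keys = list(rows[0].keys())
--     # Strong candidates first
--     preferred = []
--     for k in keys:
--         lk = k.lower().strip()
--         if lk in ("unique id", "unique_id", "_id", "id", "uid"):
--             preferred.append(k)
--     # Then anything containing id
--     for k in keys:
--         if k not in preferred and "id" in k.lower():
--             preferred.append(k)
--     # Finally, all keys as a last resort (keeps function total)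
--     for k in keys:
--         if k not in preferred:
--             preferred.append(k)
--     return preferred
--
-- def _pick_best_id_field_fallback(rows: List[dict]) -> Optional[str]:
--     if not rows:
--         return None
--     candidates = _candidate_id_fields(rows)
--     # Prefer exact-ish names
--     for target in ("Unique ID", "unique id", "_id", "unique_id", "uid", "ID", "id"):
--         for c in candidates:
--             if c.strip() == target:
--                 return c
--     # Otherwise just pick the first candidate
--     return candidates[0]
-- ===== SOURCE B (Python) =====
-- from typing import Dict, List, Optional, Set, Tuple
--
-- def _pick_best_id_field_fallback(rows: List[dict]) -> Optional[str]:
--     if not rows: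
--         return None
--     keys = list(rows[0].keys())
--     # Exact-ish priority names, case-sensitive on the stripped key
--     for target in ("Unique ID", "unique id", "_id", "unique_id", "uid", "ID", "id"):
--         for k in keys:
--             if k.strip() == target:
--                 return k
--     # Fallback: first strong-named key, else first id-containing key, else the first key
--     for k in keys:
--         if k.lower().strip() in ("unique id", "unique_id", "_id", "id", "uid"):
--             return k
--     for k in keys:
--         if "id" in k.lower():
--             return k
--     return keys[0]
-- ===== Notes on version B (the rewrite author's own statement) =====
-- stated objective: simpler
-- what changed: B deletes the _candidate_id_fields staging list (with its 'k not in preferred' membership scans) and answers directly with first-match passes over the original keys: one per priority target, then the three fallback passes in candidate order.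
-- outside the precondition, e.g. on _pick_best_id_field_fallback([{}]): A raises IndexError, B raises IndexError
import Mathlib
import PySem

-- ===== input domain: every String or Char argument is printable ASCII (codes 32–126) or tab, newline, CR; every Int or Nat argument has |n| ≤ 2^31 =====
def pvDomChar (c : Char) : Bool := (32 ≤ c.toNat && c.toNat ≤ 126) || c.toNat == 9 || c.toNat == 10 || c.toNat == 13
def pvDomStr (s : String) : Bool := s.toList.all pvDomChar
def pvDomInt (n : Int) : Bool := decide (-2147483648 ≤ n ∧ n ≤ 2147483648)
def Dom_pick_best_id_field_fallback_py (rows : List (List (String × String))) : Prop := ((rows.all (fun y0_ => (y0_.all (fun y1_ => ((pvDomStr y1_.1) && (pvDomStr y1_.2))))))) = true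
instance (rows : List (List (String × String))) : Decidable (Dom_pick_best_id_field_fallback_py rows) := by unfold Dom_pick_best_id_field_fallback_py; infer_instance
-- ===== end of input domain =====

-- B drops A's staged candidate list (with its repeated `k not in preferred` scans) and
-- answers with direct first-match passes over the keys; simpler, same return value.

-- the two literal tuples of the Python source
def pvStrongs : List String := ["unique id", "unique_id", "_id", "id", "uid"]
def pvTargets : List String := ["Unique ID", "unique id", "_id", "unique_id", "uid", "ID", "id"]

-- ===== PORT A =====
-- _candidate_id_fields: three append loops building `preferred`
def candidate_id_fields_py (rows : List (List (String × String))) : List String :=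
  match rows with
  | [] => []
  | r :: _ =>
    let keys := (PySem.Dict.ofList r).keys
    let preferred : List String := keys.foldl (fun acc k =>
      if pvStrongs.contains (PySem.Str.strip (PySem.Str.lower k)) then acc ++ [k] else acc) []
    let preferred := keys.foldl (fun acc k =>
      if !acc.contains k && PySem.Str.isIn "id" (PySem.Str.lower k) then acc ++ [k] else acc) preferred
    let preferred := keys.foldl (fun acc k =>
      if !acc.contains k then acc ++ [k] else acc) preferred
    preferred

def pick_best_id_field_fallback_py (rows : List (List (String × String))) : Option String :=
  match rows with
  | [] => none
  | _ :: _ =>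
    let candidates := candidate_id_fields_py rows
    -- nested 'for target … for c …' loop
    match pvTargets.findSome? (fun t => candidates.find? (fun c => PySem.Str.strip c == t)) with
    | some c => some c
    | none => candidates.head?  -- candidates[0]; the IndexError case (empty first dict) is outside Pre_

-- ===== PORT B =====
def pick_best_id_field_fallback_py_alt (rows : List (List (String × String))) : Option String :=
  match rows with
  | [] => none
  | r :: _ =>
    let keys := (PySem.Dict.ofList r).keys
    match pvTargets.findSome? (fun t => keys.find? (fun k => PySem.Str.strip k == t)) with
    | some k => some k
    | none =>
      match keys.find? (fun k => pvStrongs.contains (PySem.Str.strip (PySem.Str.lower k))) with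
      | some k => some k
      | none =>
        match keys.find? (fun k => PySem.Str.isIn "id" (PySem.Str.lower k)) with
        | some k => some k
        | none => keys.head?  -- keys[0]; the IndexError case (empty first dict) is outside Pre_

-- ===== PRECONDITION & SPEC =====
-- Pre_ excludes only the inputs where the Python raises IndexError: a nonempty rows whose first dict has no keys
def Pre_pick_best_id_field_fallback_py (rows : List (List (String × String))) : Prop :=
  ∀ r ∈ rows.take 1, r ≠ []
instance (rows : List (List (String × String))) : Decidable (Pre_pick_best_id_field_fallback_py rows) := by unfold Pre_pick_best_id_field_fallback_py; infer_instance
def pvWitness_pick_best_id_field_fallback_py : (List (List (String × String))) := [[("name", "x"), ("user id", "1")]]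
def Spec_pick_best_id_field_fallback_py (rows : List (List (String × String))) (out : Option String) : Prop := out = pick_best_id_field_fallback_py_alt rows
instance (rows : List (List (String × String))) (out : Option String) : Decidable (Spec_pick_best_id_field_fallback_py rows out) := by unfold Spec_pick_best_id_field_fallback_py; infer_instance

-- ===== CLAIM (what is proved, stated in full; the proofs are below) =====
def Claim_equal_pick_best_id_field_fallback_py : Prop := ∀ (rows : List (List (String × String))), Dom_pick_best_id_field_fallback_py rows → Pre_pick_best_id_field_fallback_py rows → Spec_pick_best_id_field_fallback_py rows (pick_best_id_field_fallback_py rows)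

-- ===== LEMMAS AND PROOFS =====

-- proof-side abbreviations for the two key predicates
def pvP (k : String) : Bool := pvStrongs.contains (PySem.Str.strip (PySem.Str.lower k))
def pvQ (k : String) : Bool := PySem.Str.isIn "id" (PySem.Str.lower k)

theorem isspace_lowerChar (c : Char) : PySem.Chars.isspace (PySem.Chars.lowerChar c) = PySem.Chars.isspace c := by
  unfold PySem.Chars.lowerChar
  split_ifs with h
  · have hu : 65 ≤ c.toNat ∧ c.toNat ≤ 90 := by
      simpa [PySem.Chars.isupper, Char.le_def] using h
    have hv : (Char.ofNat (c.toNat + 32)).toNat = c.toNat + 32 := by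
      have hval : Nat.isValidChar (c.toNat + 32) := by left; omega
      simp [Char.ofNat, hval, Char.ofNatAux]; omega
    have h1 : PySem.Chars.isspace c = false := by
      simp only [PySem.Chars.isspace]; simp only [Bool.or_eq_false_iff, Bool.and_eq_false_iff,
        decide_eq_false_iff_not]; omega
    have h2 : PySem.Chars.isspace (Char.ofNat (c.toNat + 32)) = false := by
      simp only [PySem.Chars.isspace, hv]; simp only [Bool.or_eq_false_iff, Bool.and_eq_false_iff,
        decide_eq_false_iff_not]; omega
    rw [h1, h2]
  · rfl

theorem dropWhile_map_comm (f : Char → Char) (p : Char → Bool) (h : ∀ c, p (f c) = p c) (l : List Char) :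
    (l.map f).dropWhile p = (l.dropWhile p).map f := by
  induction l with
  | nil => rfl
  | cons a t ih =>
    simp only [List.map_cons, List.dropWhile_cons, h a]
    cases p a <;> simp [ih]

theorem strip_lower_comm (s : String) :
    PySem.Str.strip (PySem.Str.lower s) = PySem.Str.lower (PySem.Str.strip s) := by
  apply String.toList_injective
  simp only [PySem.Str.toList_strip, PySem.Str.toList_lower]
  simp only [PySem.Chars.strip, PySem.Chars.lstrip, PySem.Chars.rstrip, PySem.Chars.lower]
  rw [dropWhile_map_comm _ _ isspace_lowerChar, ← List.map_reverse,
      dropWhile_map_comm _ _ isspace_lowerChar, List.map_reverse]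

-- an append-if loop whose test is 'k not yet collected && q k', over Nodup input:
-- membership in the accumulator is decided by f
theorem foldl_filter_mem (q f : String → Bool) :
    ∀ (l acc : List String), l.Nodup → (∀ k ∈ l, acc.contains k = f k) →
    l.foldl (fun acc k => if !acc.contains k && q k then acc ++ [k] else acc) acc
      = acc ++ l.filter (fun k => !f k && q k) := by
  intro l
  induction l with
  | nil => intro acc _ _; simp
  | cons a t ih =>
    intro acc hnd h
    have hat : a ∉ t := (List.nodup_cons.mp hnd).1
    have hca : acc.contains a = f a := h a (by simp)
    have hstep : ∀ acc', acc'.contains a = f a →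
        (if !acc'.contains a && q a then acc' ++ [a] else acc') =
        (if !f a && q a then acc' ++ [a] else acc') := by intro acc' hc; rw [hc]
    rw [List.foldl_cons, hstep acc hca, List.filter_cons]
    by_cases hfq : (!f a && q a) = true
    · rw [if_pos hfq, if_pos hfq]
      rw [ih (acc ++ [a]) (List.nodup_cons.mp hnd).2]
      · simp
      · intro k hk
        rw [List.contains_append, h k (by simp [hk])]
        simp [List.contains_eq_mem]
        intro he; exact absurd (he ▸ hk) hat
    · rw [if_neg hfq, if_neg hfq]
      exact ih acc (List.nodup_cons.mp hnd).2 (fun k hk => h k (by simp [hk]))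

-- the same loop without the extra test q
theorem foldl_dedup_mem (f : String → Bool) :
    ∀ (l acc : List String), l.Nodup → (∀ k ∈ l, acc.contains k = f k) →
    l.foldl (fun acc k => if !acc.contains k then acc ++ [k] else acc) acc
      = acc ++ l.filter (fun k => !f k) := by
  intro l
  induction l with
  | nil => intro acc _ _; simp
  | cons a t ih =>
    intro acc hnd h
    have hat : a ∉ t := (List.nodup_cons.mp hnd).1
    have hca : acc.contains a = f a := h a (by simp)
    rw [List.foldl_cons, List.filter_cons, hca]
    by_cases hf : (!f a) = true
    · rw [if_pos hf, if_pos hf]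
      rw [ih (acc ++ [a]) (List.nodup_cons.mp hnd).2]
      · simp
      · intro k hk
        rw [List.contains_append, h k (by simp [hk])]
        simp [List.contains_eq_mem]
        intro he; exact absurd (he ▸ hk) hat
    · rw [if_neg hf, if_neg hf]
      exact ih acc (List.nodup_cons.mp hnd).2 (fun k hk => h k (by simp [hk]))

-- the candidate list is the keys regrouped: strong ones, then id-containing, then the rest
theorem candidates_eq (r : List (String × String)) (rest : List (List (String × String))) :
    candidate_id_fields_py (r :: rest) =
      (PySem.Dict.ofList r).keys.filter pvP
      ++ (PySem.Dict.ofList r).keys.filter (fun k => !pvP k && pvQ k)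
      ++ (PySem.Dict.ofList r).keys.filter (fun k => !pvP k && !pvQ k) := by
  have hnd := PySem.Dict.nodup_keys_ofList r
  simp only [candidate_id_fields_py]
  revert hnd
  generalize (PySem.Dict.ofList r).keys = keys
  intro hnd
  rw [PySem.List.foldl_append_if_eq_filter, List.nil_append]
  rw [show (fun (k : String) => pvStrongs.contains (PySem.Str.strip (PySem.Str.lower k))) = pvP from rfl]
  rw [show (fun (acc : List String) (k : String) =>
        if !acc.contains k && PySem.Str.isIn "id" (PySem.Str.lower k) then acc ++ [k] else acc) =
      (fun acc k => if !acc.contains k && pvQ k then acc ++ [k] else acc) from rfl]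
  rw [foldl_filter_mem pvQ pvP keys (keys.filter pvP) hnd
      (by
        intro k hk
        rw [List.contains_eq_mem]
        by_cases hp : pvP k = true <;> simp [List.mem_filter, hk, hp])]
  rw [foldl_dedup_mem (fun k => pvP k || (!pvP k && pvQ k)) keys
      (keys.filter pvP ++ keys.filter (fun k => !pvP k && pvQ k)) hnd
      (by
        intro k hk
        rw [List.contains_append, List.contains_eq_mem, List.contains_eq_mem]
        by_cases hp : pvP k = true <;> by_cases hq : pvQ k = true <;>
          simp [List.mem_filter, hk, hp, hq])]
  have hfun : (fun (k : String) => !(pvP k || (!pvP k && pvQ k))) = (fun k => !pvP k && !pvQ k) := by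
    funext k
    cases pvP k <;> cases pvQ k <;> rfl
  rw [hfun]

-- searching the regrouped list for a strong target finds the same key as searching keys
theorem find?_filter_imp (p pred : String → Bool) (h : ∀ a, pred a = true → p a = true) :
    ∀ l : List String, (l.filter p).find? pred = l.find? pred := by
  intro l
  induction l with
  | nil => rfl
  | cons a t ih =>
    rw [List.filter_cons]
    by_cases hp : p a = true
    · rw [if_pos hp, List.find?_cons, List.find?_cons]
      cases hpred : pred a <;> simp [ih]
    · have hpa : pred a = false := by
        cases hpa : pred a
        · rfl
        · exact absurd (h a hpa) hp
      rw [if_neg hp, List.find?_cons, hpa, ih]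

theorem find_target_eq (keys : List String) (t : String)
    (ht : ∀ c, (PySem.Str.strip c == t) = true → pvP c = true) :
    (keys.filter pvP ++ keys.filter (fun k => !pvP k && pvQ k)
      ++ keys.filter (fun k => !pvP k && !pvQ k)).find? (fun c => PySem.Str.strip c == t)
    = keys.find? (fun c => PySem.Str.strip c == t) := by
  rw [List.find?_append, List.find?_append]
  have hQ : (keys.filter (fun k => !pvP k && pvQ k)).find? (fun c => PySem.Str.strip c == t) = none := by
    rw [List.find?_eq_none]
    intro x hx
    simp only [List.mem_filter, Bool.and_eq_true, Bool.not_eq_true'] at hx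
    intro hpred
    rw [ht x hpred] at hx
    simp at hx
  have hR : (keys.filter (fun k => !pvP k && !pvQ k)).find? (fun c => PySem.Str.strip c == t) = none := by
    rw [List.find?_eq_none]
    intro x hx
    simp only [List.mem_filter, Bool.and_eq_true, Bool.not_eq_true'] at hx
    intro hpred
    rw [ht x hpred] at hx
    simp at hx
  rw [hQ, hR]
  simp only [Option.or_none]
  exact find?_filter_imp pvP _ ht keys

-- every one of the seven targets is a strong name after strip/lower
theorem target_strong (t : String) (htm : t ∈ pvTargets) :
    ∀ c, (PySem.Str.strip c == t) = true → pvP c = true := by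
  intro c h
  have he : PySem.Str.strip c = t := by exact beq_iff_eq.mp h
  unfold pvP
  rw [strip_lower_comm, he]
  fin_cases htm <;> decide

theorem findSome?_congr {α β : Type} (f g : α → Option β) :
    ∀ l : List α, (∀ a ∈ l, f a = g a) → l.findSome? f = l.findSome? g := by
  intro l
  induction l with
  | nil => intro _; rfl
  | cons a t ih =>
    intro h
    rw [List.findSome?_cons, List.findSome?_cons, h a (by simp)]
    cases g a <;> simp [ih (fun x hx => h x (by simp [hx]))]

theorem head?_fallback_eq (keys : List String) :
    (keys.filter pvP ++ keys.filter (fun k => !pvP k && pvQ k)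
      ++ keys.filter (fun k => !pvP k && !pvQ k)).head?
    = (match keys.find? pvP with
       | some k => some k
       | none =>
         match keys.find? pvQ with
         | some k => some k
         | none => keys.head?) := by
  rw [List.head?_append, List.head?_append, List.head?_filter]
  cases hP : keys.find? pvP with
  | some k => simp
  | none =>
    have hallp : ∀ k ∈ keys, pvP k = false := by
      intro k hk
      have := List.find?_eq_none.mp hP k hk
      simpa using this
    have h2 : keys.filter (fun k => !pvP k && pvQ k) = keys.filter pvQ := by
      apply List.filter_congr; intro k hk; simp [hallp k hk]
    rw [h2, List.head?_filter]
    cases hQf : keys.find? pvQ with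
    | some k => simp
    | none =>
      have hallq : ∀ k ∈ keys, pvQ k = false := by
        intro k hk
        have := List.find?_eq_none.mp hQf k hk
        simpa using this
      have h3 : keys.filter (fun k => !pvP k && !pvQ k) = keys := by
        apply List.filter_eq_self.mpr
        intro k hk
        simp [hallp k hk, hallq k hk]
      rw [h3]
      simp

-- ===== VERDICT (by name: the statement is the Claim_ definition above) =====
theorem pick_best_id_field_fallback_py_spec : Claim_equal_pick_best_id_field_fallback_py := by
  intro rows _ _
  unfold Spec_pick_best_id_field_fallback_py
  cases rows with
  | nil => rfl
  | cons r rest =>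
    unfold pick_best_id_field_fallback_py pick_best_id_field_fallback_py_alt
    simp only
    rw [candidates_eq r rest]
    set keys := (PySem.Dict.ofList r).keys with hkeys
    have hfs : pvTargets.findSome? (fun t =>
        (keys.filter pvP ++ keys.filter (fun k => !pvP k && pvQ k)
          ++ keys.filter (fun k => !pvP k && !pvQ k)).find? (fun c => PySem.Str.strip c == t))
      = pvTargets.findSome? (fun t => keys.find? (fun k => PySem.Str.strip k == t)) := by
      apply findSome?_congr
      intro t htm
      exact find_target_eq keys t (target_strong t htm)
    rw [hfs]
    cases hv : pvTargets.findSome? (fun t => keys.find? (fun k => PySem.Str.strip k == t)) with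
    | some k => rfl
    | none =>
      simp only
      rw [head?_fallback_eq keys]
      rfl
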